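-- pv_equiv track=rewrite | github.com/Diplow/paduteam-wiki | Sources/Transcripts/_fetch_missing.py | segments_to_markdown
-- ===== SOURCE A (Python) =====
-- INTERVAL_S = 30
--
-- def segments_to_markdown(segments, title, video_id):
--     """Convertit les segments en markdown avec horodatages."""
--     if not segments:
--         return None
--     lines = [f"# {title}", f"\nhttps://www.youtube.com/watch?v={video_id}", ""]
--     current_block = []
--     block_start_ms = segments[0][0] if segments else 0
--
--     for start_ms, text in segments:
--         if start_ms - block_start_ms >= INTERVAL_S * 1000 and current_block:
--             ts_s = int(block_start_ms / 1000)
--             m, s = divmod(ts_s, 60)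
--             link = f"[{m:02d}:{s:02d}](https://www.youtube.com/watch?v={video_id}&t={ts_s})"
--             lines.append(f"\n**{link}**")
--             lines.append(' '.join(current_block))
--             current_block = [text]
--             block_start_ms = start_ms
--         else:
--             current_block.append(text)
--
--     if current_block:
--         ts_s = int(block_start_ms / 1000)
--         m, s = divmod(ts_s, 60)
--         link = f"[{m:02d}:{s:02d}](https://www.youtube.com/watch?v={video_id}&t={ts_s})"
--         lines.append(f"\n**{link}**")
--         lines.append(' '.join(current_block))
--
--     return '\n'.join(lines)
-- ===== SOURCE B (Python) =====
-- INTERVAL_S = 30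
--
--
-- def segments_to_markdown(segments, title, video_id):
--     """Convertit les segments en markdown avec horodatages (two-pass version)."""
--     if not segments:
--         return None
--     # Pass 1: partition the segments into blocks (block_start_ms, texts).
--     blocks = []
--     for start_ms, text in segments:
--         if blocks and start_ms - blocks[-1][0] < INTERVAL_S * 1000:
--             blocks[-1][1].append(text)
--         else:
--             blocks.append((start_ms, [text]))
--     # Pass 2: format every block.
--     lines = [f"# {title}", f"\nhttps://www.youtube.com/watch?v={video_id}", ""]
--     for block_start_ms, texts in blocks:
--         ts_s = int(block_start_ms / 1000)
--         m, s = divmod(ts_s, 60)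
--         lines.append(f"\n**[{m:02d}:{s:02d}](https://www.youtube.com/watch?v={video_id}&t={ts_s})**")
--         lines.append(' '.join(texts))
--     return '\n'.join(lines)
-- ===== Notes on version B (the rewrite author's own statement) =====
-- stated objective: alternative
-- what changed: Replaces A's single pass with interleaved grouping/formatting state (current_block, block_start_ms, trailing flush) by a two-pass decomposition: first partition the segments into a list of (block_start, texts) blocks, then format each block in a separate loop, with no final-flush special case.
import Mathlib
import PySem

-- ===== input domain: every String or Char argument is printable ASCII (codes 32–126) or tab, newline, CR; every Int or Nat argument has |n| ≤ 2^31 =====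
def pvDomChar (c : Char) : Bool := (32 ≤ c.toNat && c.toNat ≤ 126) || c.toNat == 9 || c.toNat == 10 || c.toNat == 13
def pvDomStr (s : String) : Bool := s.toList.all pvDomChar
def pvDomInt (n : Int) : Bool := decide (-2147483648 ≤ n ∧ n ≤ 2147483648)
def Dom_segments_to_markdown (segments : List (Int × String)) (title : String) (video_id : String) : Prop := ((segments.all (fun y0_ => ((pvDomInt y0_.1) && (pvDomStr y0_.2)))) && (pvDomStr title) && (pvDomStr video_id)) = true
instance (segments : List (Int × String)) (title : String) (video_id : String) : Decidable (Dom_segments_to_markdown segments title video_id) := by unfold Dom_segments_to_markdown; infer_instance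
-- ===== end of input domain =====

-- B restructures A's single interleaved loop into two passes (group into blocks, then format); equivalence of return values is proved.

-- ===== PORT A =====
-- f"{m:02d}": zero-pad to width 2; a negative single-digit value already has width 2 ("-5"), so
-- only 0 ≤ n < 10 gains a leading zero — exact for every int at width 2.
def pvPad2 (n : Int) : String := if 0 ≤ n ∧ n < 10 then "0" ++ PySem.Int.toStr n else PySem.Int.toStr n

-- the two lines appended per block: f"\n**{link}**" (with ts_s = int(block_start_ms / 1000);
-- for |block_start_ms| ≤ 2^31 Python's float division + int() equals truncating division Int.tdiv — exact on Dom)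
def pvBlockHeader (video_id : String) (block_start_ms : Int) : String :=
  let ts_s : Int := Int.tdiv block_start_ms 1000
  let m : Int := PySem.Int.floordiv ts_s 60
  let s : Int := PySem.Int.mod ts_s 60
  let link : String := "[" ++ pvPad2 m ++ ":" ++ pvPad2 s ++ "](https://www.youtube.com/watch?v=" ++ video_id ++ "&t=" ++ PySem.Int.toStr ts_s ++ ")"
  "\n**" ++ link ++ "**"

-- one iteration of A's for-loop; state = (lines, current_block, block_start_ms)
def pvStepA (video_id : String) (acc : List String × List String × Int) (seg : Int × String) : List String × List String × Int :=
  let (lines, current_block, block_start_ms) := acc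
  let (start_ms, text) := seg
  if start_ms - block_start_ms ≥ 30 * 1000 ∧ current_block ≠ [] then
    (lines ++ [pvBlockHeader video_id block_start_ms, PySem.Str.join " " current_block], [text], start_ms)
  else
    (lines, current_block ++ [text], block_start_ms)

def segments_to_markdown (segments : List (Int × String)) (title : String) (video_id : String) : Option String :=
  if segments = [] then none
  else
    let lines : List String := ["# " ++ title, "\nhttps://www.youtube.com/watch?v=" ++ video_id, ""]
    let block_start_ms : Int := match segments with | [] => 0 | (ms, _) :: _ => ms
    let st := segments.foldl (pvStepA video_id) (lines, [], block_start_ms)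
    let (lines, current_block, block_start_ms) := st
    let lines := if current_block ≠ [] then
        lines ++ [pvBlockHeader video_id block_start_ms, PySem.Str.join " " current_block]
      else lines
    some (PySem.Str.join "\n" lines)

-- ===== PORT B =====
-- pass 1 step: append text to the last block, or open a new block (blocks[-1] / blocks.append)
def pvGroupStep (blocks : List (Int × List String)) (seg : Int × String) : List (Int × List String) :=
  let (start_ms, text) := seg
  match blocks.getLast? with
  | some (bs, ts) =>
    if start_ms - bs < 30 * 1000 then blocks.dropLast ++ [(bs, ts ++ [text])]
    else blocks ++ [(start_ms, [text])]
  | none => blocks ++ [(start_ms, [text])]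

-- pass 2 step: two lines per block
def pvRenderStep (video_id : String) (lines : List String) (b : Int × List String) : List String :=
  lines ++ [pvBlockHeader video_id b.1, PySem.Str.join " " b.2]

def segments_to_markdown_alt (segments : List (Int × String)) (title : String) (video_id : String) : Option String :=
  if segments = [] then none
  else
    let blocks := segments.foldl pvGroupStep []
    let lines : List String := ["# " ++ title, "\nhttps://www.youtube.com/watch?v=" ++ video_id, ""]
    let lines := blocks.foldl (pvRenderStep video_id) lines
    some (PySem.Str.join "\n" lines)

-- ===== PRECONDITION & SPEC =====
def Spec_segments_to_markdown (segments : List (Int × String)) (title : String) (video_id : String) (out : Option String) : Prop := out = segments_to_markdown_alt segments title video_id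
instance (segments : List (Int × String)) (title : String) (video_id : String) (out : Option String) : Decidable (Spec_segments_to_markdown segments title video_id out) := by unfold Spec_segments_to_markdown; infer_instance

-- ===== CLAIM (what is proved, stated in full; the proofs are below) =====
def Claim_equal_segments_to_markdown : Prop := ∀ (segments : List (Int × String)) (title : String) (video_id : String), Dom_segments_to_markdown segments title video_id → Spec_segments_to_markdown segments title video_id (segments_to_markdown segments title video_id)

-- ===== LEMMAS AND PROOFS =====

-- A's trailing flush, as a function of the loop state
def pvFinishA (video_id : String) (st : List String × List String × Int) : List String :=
  let (lines, current_block, block_start_ms) := st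
  if current_block ≠ [] then
    lines ++ [pvBlockHeader video_id block_start_ms, PySem.Str.join " " current_block]
  else lines

-- pass 1 only ever touches the last block: any earlier blocks pass through unchanged
theorem pvGroup_prefix (rest : List (Int × String)) (bs : List (Int × List String)) (l : Int × List String) :
    rest.foldl pvGroupStep (bs ++ [l]) = bs ++ rest.foldl pvGroupStep [l] := by
  induction rest generalizing bs l with
  | nil => simp
  | cons seg rest ih =>
    obtain ⟨ms, t⟩ := seg
    obtain ⟨s, ts⟩ := l
    simp only [List.foldl_cons, pvGroupStep, List.getLast?_append, List.getLast?_singleton,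
      Option.some_or, List.dropLast_concat]
    by_cases h : ms - s < 30 * 1000
    · simp only [if_pos h, List.dropLast_singleton, List.nil_append]
      exact ih bs (s, ts ++ [t])
    · simp only [if_neg h]
      calc List.foldl pvGroupStep (bs ++ [(s, ts)] ++ [(ms, [t])]) rest
          = (bs ++ [(s, ts)]) ++ List.foldl pvGroupStep [(ms, [t])] rest := ih (bs ++ [(s, ts)]) (ms, [t])
        _ = bs ++ ([(s, ts)] ++ List.foldl pvGroupStep [(ms, [t])] rest) := by simp
        _ = bs ++ List.foldl pvGroupStep ([(s, ts)] ++ [(ms, [t])]) rest := by rw [ih [(s, ts)] (ms, [t])]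

-- main invariant: with a nonempty current block, finishing A's loop renders exactly B's blocks
theorem pvMain (video_id : String) (rest : List (Int × String)) (lines cur : List String) (bs : Int)
    (hcur : cur ≠ []) :
    pvFinishA video_id (rest.foldl (pvStepA video_id) (lines, cur, bs)) =
      (rest.foldl pvGroupStep [(bs, cur)]).foldl (pvRenderStep video_id) lines := by
  induction rest generalizing lines cur bs with
  | nil => simp [pvFinishA, pvRenderStep, hcur]
  | cons seg rest ih =>
    obtain ⟨ms, t⟩ := seg
    simp only [List.foldl_cons]
    by_cases h : ms - bs < 30 * 1000
    · have h1 : pvStepA video_id (lines, cur, bs) (ms, t) = (lines, cur ++ [t], bs) := by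
        simp only [pvStepA]
        rw [if_neg]
        rintro ⟨h2, -⟩; omega
      have h2 : pvGroupStep [(bs, cur)] (ms, t) = [(bs, cur ++ [t])] := by
        simp only [pvGroupStep, List.getLast?_singleton]
        rw [if_pos h]
        simp
      rw [h1, h2]
      exact ih lines (cur ++ [t]) bs (by simp)
    · have h1 : pvStepA video_id (lines, cur, bs) (ms, t) =
          (lines ++ [pvBlockHeader video_id bs, PySem.Str.join " " cur], [t], ms) := by
        simp only [pvStepA]
        rw [if_pos ⟨by omega, hcur⟩]
      have h2 : pvGroupStep [(bs, cur)] (ms, t) = [(bs, cur)] ++ [(ms, [t])] := by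
        simp only [pvGroupStep, List.getLast?_singleton]
        rw [if_neg h]
      rw [h1, h2, pvGroup_prefix rest [(bs, cur)] (ms, [t]), List.foldl_append]
      rw [ih (lines ++ [pvBlockHeader video_id bs, PySem.Str.join " " cur]) [t] ms (by simp)]
      rfl

-- ===== VERDICT (by name: the statement is the Claim_ definition above) =====
theorem segments_to_markdown_spec : Claim_equal_segments_to_markdown := by
  intro segments title video_id _
  unfold Spec_segments_to_markdown segments_to_markdown segments_to_markdown_alt
  cases segments with
  | nil => simp
  | cons seg rest =>
    obtain ⟨ms0, t0⟩ := seg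
    simp only [if_neg (List.cons_ne_nil _ _), List.foldl_cons]
    rw [show pvStepA video_id (["# " ++ title, "\nhttps://www.youtube.com/watch?v=" ++ video_id, ""], [], ms0) (ms0, t0)
          = (["# " ++ title, "\nhttps://www.youtube.com/watch?v=" ++ video_id, ""], [t0], ms0) by
          simp [pvStepA],
        show pvGroupStep [] (ms0, t0) = [(ms0, [t0])] by simp [pvGroupStep]]
    have := pvMain video_id rest ["# " ++ title, "\nhttps://www.youtube.com/watch?v=" ++ video_id, ""] [t0] ms0 (by simp)
    simp only [pvFinishA] at this
    exact congrArg (fun l => some (PySem.Str.join "\n" l)) this
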